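-- pv_equiv track=rewrite | github.com/nikgora/DevelopCompilytors | Algorithms_for_searching_nonTerminals.py | find_nonproductive_nonterminals
-- ===== SOURCE A (Python) =====
-- def find_nonproductive_nonterminals(grammar, terminals):
--     productive = set()
--     changes = True
--
--     while changes:
--         changes = False
--         for nonterminal, productions in grammar.items():
--             for production in productions:
--                 if all(symbol in productive or symbol in terminals for symbol in production):
--                     if nonterminal not in productive:
--                         productive.add(nonterminal)
--                         changes = True
--
--     nonproductive = set(grammar.keys()) - productive
--     return nonproductive
-- ===== SOURCE B (Python) =====
-- def find_nonproductive_nonterminals(grammar, terminals):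
--     # Fixpoint by propagation: index each occurrence of a nonterminal-symbol
--     # by the productions it blocks, keep an unresolved-occurrence counter per
--     # production, and propagate productivity through a FIFO worklist instead of
--     # rescanning the grammar.
--     terms = set(terminals)
--     occurs = {}      # symbol -> list of production ids it occurs in (with multiplicity)
--     need = []        # production id -> number of still-unresolved symbol occurrences
--     owner = []       # production id -> its left-hand nonterminal
--     productive = set()
--     queue = []
--     for nt, prods in grammar.items():
--         for p in prods:
--             pid = len(need)
--             owner.append(nt)
--             unresolved = [s for s in p if s not in terms]
--             need.append(len(unresolved))
--             for s in unresolved: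
--                 occurs.setdefault(s, []).append(pid)
--             if not unresolved and nt not in productive:
--                 productive.add(nt)
--                 queue.append(nt)
--     qi = 0
--     while qi < len(queue):
--         x = queue[qi]
--         qi += 1
--         for pid in occurs.get(x, ()):
--             need[pid] -= 1
--             if need[pid] == 0:
--                 nt = owner[pid]
--                 if nt not in productive:
--                     productive.add(nt)
--                     queue.append(nt)
--     return {nt for nt in grammar if nt not in productive}
-- ===== Notes on version B (the rewrite author's own statement) =====
-- stated objective: alternative
-- what changed: Instead of A's repeated full-grammar rescans until no change, B builds an occurrence index (symbol -> productions it blocks) and a per-production unresolved-occurrence counter once, then propagates productivity through a FIFO worklist, decrementing counters and enqueuing a nonterminal exactly when one of its productions' counter first hits zero; the residual keys are returned directly.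
import Mathlib
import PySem

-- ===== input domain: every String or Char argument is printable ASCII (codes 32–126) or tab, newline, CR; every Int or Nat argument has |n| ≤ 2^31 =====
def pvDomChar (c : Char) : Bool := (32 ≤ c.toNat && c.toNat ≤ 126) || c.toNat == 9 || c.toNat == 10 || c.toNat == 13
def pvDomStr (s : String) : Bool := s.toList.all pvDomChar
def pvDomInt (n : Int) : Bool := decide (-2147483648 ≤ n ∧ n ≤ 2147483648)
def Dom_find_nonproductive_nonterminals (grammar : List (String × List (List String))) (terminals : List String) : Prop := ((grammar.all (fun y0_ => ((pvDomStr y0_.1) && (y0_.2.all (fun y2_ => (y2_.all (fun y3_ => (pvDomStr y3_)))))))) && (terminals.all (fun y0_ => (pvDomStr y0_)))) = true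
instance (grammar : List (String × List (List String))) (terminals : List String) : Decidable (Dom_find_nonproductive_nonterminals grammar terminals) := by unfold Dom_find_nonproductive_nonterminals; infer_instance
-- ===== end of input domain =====

-- B replaces A's repeated full-grammar rescans by worklist propagation over
-- per-production unresolved-occurrence counters (a different algorithm, same result).

-- ===== PORT A =====
-- inner 'for production in productions' loop of A's pass
def pyPassProds (terminals : List String) (nt : String) (prods : List (List String)) (st : PySem.Set String × Bool) : PySem.Set String × Bool :=
  match prods with
  | [] => st
  | p :: rest =>
      pyPassProds terminals nt rest
        (if p.all (fun s => PySem.Set.contains st.1 s || terminals.contains s) then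
           (if !(PySem.Set.contains st.1 nt) then (PySem.Set.add st.1 nt, true) else st)
         else st)

-- outer 'for nonterminal, productions in grammar.items()' loop of one pass
def pyPass (terminals : List String) (items : List (String × List (List String))) (st : PySem.Set String × Bool) : PySem.Set String × Bool :=
  match items with
  | [] => st
  | (nt, prods) :: rest => pyPass terminals rest (pyPassProds terminals nt prods st)

-- lemmas cited by pyLoop's decreasing_by (termination of A's 'while changes' loop)
theorem pvPassProds_spec (terminals : List String) (nt : String) : ∀ (prods : List (List String)) (st : PySem.Set String × Bool),
    ∃ ext : List String,
      (pyPassProds terminals nt prods st).1 = st.1 ++ ext ∧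
      (∀ x ∈ ext, x = nt ∧ PySem.Set.contains st.1 x = false) ∧
      (pyPassProds terminals nt prods st).2 = (st.2 || !ext.isEmpty) := by
  intro prods
  induction prods with
  | nil => intro st; exact ⟨[], by simp [pyPassProds]⟩
  | cons p rest ih =>
    intro st
    rw [pyPassProds]
    by_cases hc : p.all (fun s => PySem.Set.contains st.1 s || terminals.contains s) = true
    · by_cases hn : PySem.Set.contains st.1 nt = true
      · simp only [hc, hn, if_true, Bool.not_true, Bool.false_eq_true, if_false]
        exact ih st
      · have hn' : PySem.Set.contains st.1 nt = false := by simpa using hn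
        simp only [hc, hn', if_true, Bool.not_false, if_true]
        obtain ⟨ext, h1, h2, h3⟩ := ih (PySem.Set.add st.1 nt, true)
        refine ⟨nt :: ext, ?_, ?_, ?_⟩
        · rw [h1]
          have : PySem.Set.add st.1 nt = st.1 ++ [nt] :=
            PySem.Set.add_of_not_mem (by simpa [PySem.Set.contains_iff] using hn)
          simp [this]
        · intro x hx
          rcases List.mem_cons.mp hx with h | h
          · exact ⟨h, h ▸ hn'⟩
          · obtain ⟨he, hcn⟩ := h2 x h
            refine ⟨he, ?_⟩
            simp only [PySem.Set.contains] at hcn ⊢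
            have : PySem.Set.add st.1 nt = st.1 ++ [nt] :=
              PySem.Set.add_of_not_mem (by simpa [PySem.Set.contains_iff] using hn)
            rw [this, List.contains_append] at hcn
            exact (Bool.or_eq_false_iff.mp hcn).1
        · rw [h3]; simp
    · have hc' : p.all (fun s => PySem.Set.contains st.1 s || terminals.contains s) = false := by simpa using hc
      simp only [hc', Bool.false_eq_true, if_false]
      exact ih st

theorem pvPass_spec (terminals : List String) : ∀ (items : List (String × List (List String))) (st : PySem.Set String × Bool),
    ∃ ext : List String,
      (pyPass terminals items st).1 = st.1 ++ ext ∧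
      (∀ x ∈ ext, x ∈ items.map Prod.fst ∧ PySem.Set.contains st.1 x = false) ∧
      (pyPass terminals items st).2 = (st.2 || !ext.isEmpty) := by
  intro items
  induction items with
  | nil => intro st; exact ⟨[], by simp [pyPass]⟩
  | cons e rest ih =>
    obtain ⟨nt, prods⟩ := e
    intro st
    rw [pyPass]
    obtain ⟨e1, h11, h12, h13⟩ := pvPassProds_spec terminals nt prods st
    obtain ⟨e2, h21, h22, h23⟩ := ih (pyPassProds terminals nt prods st)
    refine ⟨e1 ++ e2, ?_, ?_, ?_⟩
    · rw [h21, h11, List.append_assoc]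
    · intro x hx
      rcases List.mem_append.mp hx with h | h
      · obtain ⟨he, hcn⟩ := h12 x h
        exact ⟨by simp [he], hcn⟩
      · obtain ⟨he, hcn⟩ := h22 x h
        rw [h11] at hcn
        simp only [PySem.Set.contains, List.contains_append] at hcn
        exact ⟨by simp [he], (Bool.or_eq_false_iff.mp hcn).1⟩
    · rw [h23, h13]
      cases st.2 <;> cases h1 : e1.isEmpty <;> cases h2 : e2.isEmpty <;> simp_all

theorem pvFilterLt {α : Type} {p q : α → Bool} (h : ∀ x, p x = true → q x = true)
    {l : List α} {x : α} (hx : x ∈ l) (hq : q x = true) (hp : p x = false) :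
    (l.filter p).length < (l.filter q).length := by
  obtain ⟨s, t, rfl⟩ := List.append_of_mem hx
  simp only [List.filter_append, List.length_append, List.filter_cons, hp, hq, if_true, Bool.false_eq_true, if_false]
  have h1 : (s.filter p).length ≤ (s.filter q).length := by
    simpa [← List.countP_eq_length_filter] using List.countP_mono_left (p := p) (q := q) (fun a _ => h a)
  have h2 : (t.filter p).length ≤ (t.filter q).length := by
    simpa [← List.countP_eq_length_filter] using List.countP_mono_left (p := p) (q := q) (fun a _ => h a)
  simp only [List.length_cons]
  omega

-- 'while changes' loop of A
def pyLoop (terminals : List String) (items : List (String × List (List String))) (productive : PySem.Set String) : PySem.Set String :=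
  if h : (pyPass terminals items (productive, false)).2 = true then
    pyLoop terminals items (pyPass terminals items (productive, false)).1
  else
    (pyPass terminals items (productive, false)).1
termination_by ((items.map Prod.fst).filter (fun k => !(PySem.Set.contains productive k))).length
decreasing_by
  obtain ⟨ext, h1, h2, h3⟩ := pvPass_spec terminals items (productive, false)
  rw [h] at h3
  have hne : ext ≠ [] := by
    intro he; rw [he] at h3; simp at h3
  obtain ⟨x, hx⟩ := List.exists_mem_of_ne_nil ext hne
  obtain ⟨hxk, hxs⟩ := h2 x hx
  refine pvFilterLt (p := fun k => !(PySem.Set.contains (pyPass terminals items (productive, false)).1 k))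
    (q := fun k => !(PySem.Set.contains productive k)) ?_ hxk ?_ ?_
  · intro y hy
    simp only [PySem.Set.contains, Bool.not_eq_true', h1, List.contains_append] at hy ⊢
    exact (Bool.or_eq_false_iff.mp hy).1
  · simpa using hxs
  · have hmem : x ∈ (pyPass terminals items (productive, false)).1 := by
      rw [h1]; exact List.mem_append_right _ hx
    simp [PySem.Set.contains, hmem]

def find_nonproductive_nonterminals (grammar : List (String × List (List String))) (terminals : List String) : List String :=
  let d := PySem.Dict.ofList grammar
  PySem.Set.diff (PySem.Set.ofList (PySem.Dict.keys d)) (pyLoop terminals d.items PySem.Set.empty)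

-- ===== PORT B =====
-- Python's 'unresolved = [s for s in p if s not in terms]' (terms = set(terminals))
def bUnres (terminals : List String) (p : List String) : List String :=
  p.filter (fun s => !(terminals.contains s))

-- body of B's build loop for one production p of nonterminal nt; the
-- 'for s in unresolved: occurs.setdefault(s, []).append(pid)' loop is folded over
-- the (symbol, pid) pairs so that each step is Dict.modify (exact for setdefault+append)
def bBuildProd (terminals : List String) (nt : String)
    (st : PySem.Dict String (List Nat) × List Int × List String × List String × PySem.Set String)
    (p : List String) :
    PySem.Dict String (List Nat) × List Int × List String × List String × PySem.Set String :=
  match st with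
  | (occurs, need, owner, queue, productive) =>
    let pid := need.length
    let unresolved := bUnres terminals p
    let occurs' := (unresolved.map (fun s => (s, pid))).foldl
        (fun d q => d.modify q.1 [] (fun l => l ++ [q.2])) occurs
    if unresolved.isEmpty && !(PySem.Set.contains productive nt) then
      (occurs', need ++ [(unresolved.length : Int)], owner ++ [nt], queue ++ [nt], PySem.Set.add productive nt)
    else
      (occurs', need ++ [(unresolved.length : Int)], owner ++ [nt], queue, productive)

-- B's build phase: 'for nt, prods in grammar.items(): for p in prods: …'
def bBuild (terminals : List String) (items : List (String × List (List String)))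
    (st : PySem.Dict String (List Nat) × List Int × List String × List String × PySem.Set String) :
    PySem.Dict String (List Nat) × List Int × List String × List String × PySem.Set String :=
  items.foldl (fun st e => e.2.foldl (bBuildProd terminals e.1) st) st

-- B's inner 'for pid in occurs.get(x, ())' loop; all pids are in range by
-- construction, so List.getD/List.set are exact for Python's need[pid] there
def bInner (owner : List String) (pids : List Nat) (need : List Int)
    (S : PySem.Set String) (Q : List String) : List Int × PySem.Set String × List String :=
  match pids with
  | [] => (need, S, Q)
  | pid :: rest =>
    let need' := need.set pid (need.getD pid 0 - 1)
    if need'.getD pid 0 == 0 then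
      -- nt = owner[pid], written inline
      if PySem.Set.contains S (owner.getD pid "") then bInner owner rest need' S Q
      else bInner owner rest need' (PySem.Set.add S (owner.getD pid "")) (Q ++ [owner.getD pid ""])
    else bInner owner rest need' S Q

-- lemmas cited by bPop's decreasing_by (termination of B's worklist loop)
def pvExtOk (U : List String) : List String → List String → Prop
  | _, [] => True
  | S, y :: t => y ∈ U ∧ y ∉ S ∧ pvExtOk U (S ++ [y]) t

theorem pvBInner_ext (owner : List String) : ∀ (pids : List Nat) (need : List Int) (S : PySem.Set String) (Q : List String),
    ∃ ext, (bInner owner pids need S Q).2.1 = S ++ ext ∧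
      (bInner owner pids need S Q).2.2 = Q ++ ext ∧
      pvExtOk ("" :: owner) S ext := by
  intro pids
  induction pids with
  | nil => intro need S Q; exact ⟨[], by simp [bInner, pvExtOk]⟩
  | cons pid rest ih =>
    intro need S Q
    rw [bInner]
    split
    · split
      · exact ih _ _ _
      · rename_i hnm
        have hnm' : owner.getD pid "" ∉ S := by
          intro hm
          exact hnm ((PySem.Set.contains_iff S _).mpr hm)
        have hadd : PySem.Set.add S (owner.getD pid "") = S ++ [owner.getD pid ""] :=
          PySem.Set.add_of_not_mem hnm'
        obtain ⟨ext, h1, h2, h3⟩ := ih (need.set pid (need.getD pid 0 - 1)) (PySem.Set.add S (owner.getD pid "")) (Q ++ [owner.getD pid ""])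
        refine ⟨owner.getD pid "" :: ext, ?_, ?_, ?_⟩
        · rw [h1, hadd]; simp
        · rw [h2]; simp
        · refine ⟨?_, hnm', ?_⟩
          · by_cases hlt : pid < owner.length
            · exact List.mem_cons_of_mem _ (by rw [List.getD_eq_getElem _ _ hlt]; exact List.getElem_mem hlt)
            · rw [List.getD_eq_default _ _ (by omega)]; exact List.mem_cons_self
          · rw [← hadd]; exact h3
    · exact ih _ _ _

theorem pvExt_measure (U : List String) : ∀ (ext S : List String), pvExtOk U S ext →
    (U.filter (fun k => !(PySem.Set.contains (S ++ ext) k))).length + ext.length ≤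
      (U.filter (fun k => !(PySem.Set.contains S k))).length := by
  intro ext
  induction ext with
  | nil => intro S _; simp
  | cons y t ih =>
    intro S h
    obtain ⟨hU, hS, hrest⟩ := h
    have hlt : ((U.filter (fun k => !(PySem.Set.contains (S ++ [y]) k))).length <
        (U.filter (fun k => !(PySem.Set.contains S k))).length) := by
      refine pvFilterLt ?_ hU ?_ ?_
      · intro z hz
        simp only [PySem.Set.contains, Bool.not_eq_true', List.contains_append] at hz ⊢
        exact (Bool.or_eq_false_iff.mp hz).1
      · simpa [PySem.Set.contains] using hS
      · simp [PySem.Set.contains]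
    have := ih (S ++ [y]) hrest
    rw [List.append_assoc] at this
    simp only [List.singleton_append] at this ⊢
    simp only [List.length_cons]
    omega

-- B's worklist loop: the qi cursor over the append-only Python queue is ported as
-- head-pop of the remaining suffix (the same traversal order)
def bPop (owner : List String) (occurs : PySem.Dict String (List Nat))
    (need : List Int) (S : PySem.Set String) (Q : List String) : PySem.Set String :=
  match Q with
  | [] => S
  | x :: rest =>
    let r := bInner owner (occurs.getD x []) need S rest
    bPop owner occurs r.1 r.2.1 r.2.2
termination_by 2 * ((("" :: owner).filter (fun k => !(PySem.Set.contains S k))).length) + Q.length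
decreasing_by
  obtain ⟨ext, h1, h2, h3⟩ := pvBInner_ext owner (occurs.getD x []) need S rest
  have := pvExt_measure ("" :: owner) ext S h3
  rw [← h1] at this
  simp only [h2]
  simp only [List.length_append, List.length_cons]
  omega

def find_nonproductive_nonterminals_alt (grammar : List (String × List (List String))) (terminals : List String) : List String :=
  let d := PySem.Dict.ofList grammar
  match bBuild terminals d.items (PySem.Dict.empty, [], [], [], PySem.Set.empty) with
  | (occurs, need, owner, queue, productive) =>
    let productive := bPop owner occurs need productive queue
    PySem.Set.ofList ((PySem.Dict.keys d).filter (fun k => !(PySem.Set.contains productive k)))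

-- ===== PRECONDITION & SPEC =====
def Spec_find_nonproductive_nonterminals (grammar : List (String × List (List String))) (terminals : List String) (out : List String) : Prop := out = find_nonproductive_nonterminals_alt grammar terminals
instance (grammar : List (String × List (List String))) (terminals : List String) (out : List String) : Decidable (Spec_find_nonproductive_nonterminals grammar terminals out) := by unfold Spec_find_nonproductive_nonterminals; infer_instance

-- ===== CLAIM (what is proved, stated in full; the proofs are below) =====
def Claim_equal_find_nonproductive_nonterminals : Prop := ∀ (grammar : List (String × List (List String))) (terminals : List String), Dom_find_nonproductive_nonterminals grammar terminals → Spec_find_nonproductive_nonterminals grammar terminals (find_nonproductive_nonterminals grammar terminals)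

-- ===== LEMMAS AND PROOFS =====

-- semantic characterisation both fixpoints are proved equal to
inductive Productive (items : List (String × List (List String))) (terminals : List String) : String → Prop where
  | step (nt : String) (prods : List (List String)) (p : List String)
      (hmem : (nt, prods) ∈ items) (hp : p ∈ prods)
      (hsym : ∀ s ∈ p, s ∉ terminals → Productive items terminals s) :
      Productive items terminals nt


-- ---------- A-side: the while-loop's fixpoint is exactly Productive ----------
theorem pvPassProds_closed (terminals : List String) (nt : String) :
    ∀ (prods : List (List String)) (S : PySem.Set String),
    pyPassProds terminals nt prods (S, false) = (S, false) →
    ∀ p ∈ prods, p.all (fun s => PySem.Set.contains S s || terminals.contains s) = true →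
    PySem.Set.contains S nt = true := by
  intro prods
  induction prods with
  | nil => intro S _ p hp; simp at hp
  | cons p0 rest ih =>
    intro S hfix p hp hall
    rw [pyPassProds] at hfix
    by_cases hc : p0.all (fun s => PySem.Set.contains S s || terminals.contains s) = true
    · by_cases hn : PySem.Set.contains S nt = true
      · exact hn
      · exfalso
        have hn' : PySem.Set.contains S nt = false := by simpa using hn
        simp only [hc, hn', if_true, Bool.not_false, if_true] at hfix
        obtain ⟨ext, h1, h2, h3⟩ := pvPassProds_spec terminals nt rest (PySem.Set.add S nt, true)
        rw [hfix] at h3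
        simp at h3
    · have hc' : p0.all (fun s => PySem.Set.contains S s || terminals.contains s) = false := by simpa using hc
      simp only [hc', Bool.false_eq_true, if_false] at hfix
      rcases List.mem_cons.mp hp with rfl | hmem
      · rw [hc'] at hall; exact absurd hall (by simp)
      · exact ih S hfix p hmem hall

theorem pvPass_closed (terminals : List String) :
    ∀ (items : List (String × List (List String))) (F : PySem.Set String),
    pyPass terminals items (F, false) = (F, false) →
    ∀ e ∈ items, ∀ p ∈ e.2, p.all (fun s => PySem.Set.contains F s || terminals.contains s) = true →
    PySem.Set.contains F e.1 = true := by
  intro items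
  induction items with
  | nil => intro F _ e he; simp at he
  | cons e0 rest ih =>
    obtain ⟨nt, prods⟩ := e0
    intro F hfix e he p hp hall
    rw [pyPass] at hfix
    obtain ⟨e1, h11, h12, h13⟩ := pvPassProds_spec terminals nt prods (F, false)
    obtain ⟨e2, h21, h22, h23⟩ := pvPass_spec terminals rest (pyPassProds terminals nt prods (F, false))
    rw [hfix] at h21 h23
    have hlen := congrArg List.length h21
    rw [h11] at hlen
    simp only [List.length_append] at hlen
    have he1 : e1 = [] := List.eq_nil_of_length_eq_zero (by omega)
    have he2 : e2 = [] := List.eq_nil_of_length_eq_zero (by omega)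
    have hst : pyPassProds terminals nt prods (F, false) = (F, false) := by
      have h1' : (pyPassProds terminals nt prods (F, false)).1 = F := by
        rw [h11, he1]; simp
      have h2' : (pyPassProds terminals nt prods (F, false)).2 = false := by
        rw [h13, he1]; simp
      exact Prod.ext_iff.mpr ⟨h1', h2'⟩
    rcases List.mem_cons.mp he with rfl | hmem
    · exact pvPassProds_closed terminals nt prods F hst p hp hall
    · rw [hst] at hfix
      exact ih F hfix e hmem p hp hall

theorem pvPassProds_sound (items : List (String × List (List String))) (terminals : List String) (nt : String) (prods0 : List (List String)) (hmem : (nt, prods0) ∈ items) :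
    ∀ (prods : List (List String)) (st : PySem.Set String × Bool),
    (∀ p ∈ prods, p ∈ prods0) →
    (∀ x, PySem.Set.contains st.1 x = true → Productive items terminals x) →
    ∀ x, PySem.Set.contains (pyPassProds terminals nt prods st).1 x = true → Productive items terminals x := by
  intro prods
  induction prods with
  | nil => intro st _ hinv x hx; rw [pyPassProds] at hx; exact hinv x hx
  | cons p0 rest ih =>
    intro st hsub hinv x hx
    rw [pyPassProds] at hx
    by_cases hc : p0.all (fun s => PySem.Set.contains st.1 s || terminals.contains s) = true
    · by_cases hn : PySem.Set.contains st.1 nt = true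
      · simp only [hc, hn, if_true, Bool.not_true, Bool.false_eq_true, if_false] at hx
        exact ih st (fun p hp => hsub p (List.mem_cons_of_mem _ hp)) hinv x hx
      · have hn' : PySem.Set.contains st.1 nt = false := by simpa using hn
        simp only [hc, hn', if_true, Bool.not_false] at hx
        refine ih (PySem.Set.add st.1 nt, true) (fun p hp => hsub p (List.mem_cons_of_mem _ hp)) ?_ x hx
        intro y hy
        have hy' : y ∈ PySem.Set.add st.1 nt := List.contains_iff_mem.mp hy
        rcases (PySem.Set.mem_add _ _ _).mp hy' with hyS | rfl
        · exact hinv y (List.contains_iff_mem.mpr hyS)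
        · refine Productive.step y prods0 p0 hmem (hsub p0 List.mem_cons_self) ?_
          intro s hs hsT
          have := (List.all_eq_true.mp hc) s hs
          have htc : terminals.contains s = false := by
            by_contra hcc
            exact hsT (List.contains_iff_mem.mp (by simpa using hcc))
          rw [htc, Bool.or_false] at this
          exact hinv s this
    · have hc' : p0.all (fun s => PySem.Set.contains st.1 s || terminals.contains s) = false := by simpa using hc
      simp only [hc', Bool.false_eq_true, if_false] at hx
      exact ih st (fun p hp => hsub p (List.mem_cons_of_mem _ hp)) hinv x hx

theorem pvPass_sound (items : List (String × List (List String))) (terminals : List String) :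
    ∀ (its : List (String × List (List String))) (st : PySem.Set String × Bool),
    (∀ e ∈ its, e ∈ items) →
    (∀ x, PySem.Set.contains st.1 x = true → Productive items terminals x) →
    ∀ x, PySem.Set.contains (pyPass terminals its st).1 x = true → Productive items terminals x := by
  intro its
  induction its with
  | nil => intro st _ hinv x hx; rw [pyPass] at hx; exact hinv x hx
  | cons e rest ih =>
    obtain ⟨nt, prods⟩ := e
    intro st hsub hinv x hx
    rw [pyPass] at hx
    refine ih _ (fun e he => hsub e (List.mem_cons_of_mem _ he)) ?_ x hx
    exact pvPassProds_sound items terminals nt prods (hsub _ List.mem_cons_self) prods st (fun p hp => hp) hinv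

theorem pvPyLoop_sound (items : List (String × List (List String))) (terminals : List String) :
    ∀ (S : PySem.Set String),
    (∀ x, PySem.Set.contains S x = true → Productive items terminals x) →
    ∀ x, PySem.Set.contains (pyLoop terminals items S) x = true → Productive items terminals x := by
  intro S
  induction S using pyLoop.induct (terminals := terminals) (items := items) with
  | case1 S h ih =>
    intro hinv x hx
    rw [pyLoop, dif_pos h] at hx
    exact ih (pvPass_sound items terminals items (S, false) (fun e he => he) hinv) x hx
  | case2 S h =>
    intro hinv x hx
    rw [pyLoop, dif_neg h] at hx
    exact pvPass_sound items terminals items (S, false) (fun e he => he) hinv x hx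

theorem pvPyLoop_fix (terminals : List String) (items : List (String × List (List String))) :
    ∀ (S : PySem.Set String),
    pyPass terminals items (pyLoop terminals items S, false) = (pyLoop terminals items S, false) := by
  intro S
  induction S using pyLoop.induct (terminals := terminals) (items := items) with
  | case1 S h ih =>
    rw [pyLoop, dif_pos h]
    exact ih
  | case2 S h =>
    rw [pyLoop, dif_neg h]
    obtain ⟨ext, h1, h2, h3⟩ := pvPass_spec terminals items (S, false)
    have hb : (pyPass terminals items (S, false)).2 = false := by simpa using h
    rw [hb] at h3
    have hext : ext = [] := by
      cases ext with
      | nil => rfl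
      | cons a l => simp at h3
    rw [hext] at h1
    simp only [List.append_nil] at h1
    have hfix : pyPass terminals items (S, false) = (S, false) := Prod.ext_iff.mpr ⟨by simpa using h1, hb⟩
    rw [h1]
    exact hfix

theorem pvA_complete (terminals : List String) (items : List (String × List (List String))) (x : String)
    (hx : Productive items terminals x) :
    PySem.Set.contains (pyLoop terminals items PySem.Set.empty) x = true := by
  induction hx with
  | step nt prods p hmem hp hsym ih =>
    apply pvPass_closed terminals items _ (pvPyLoop_fix terminals items PySem.Set.empty) (nt, prods) hmem p hp
    rw [List.all_eq_true]
    intro s hs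
    by_cases hsT : s ∈ terminals
    · have : terminals.contains s = true := List.contains_iff_mem.mpr hsT
      rw [this]; simp
    · rw [ih s hs hsT]; simp

-- ---------- B-side: build-phase characterisation ----------
-- the flat list of (nonterminal, production) pairs in build order
def pvPlist (items : List (String × List (List String))) : List (String × List String) :=
  items.flatMap (fun e => e.2.map (fun p => (e.1, p)))

theorem pvBuild_eq (terminals : List String) : ∀ (items : List (String × List (List String))) st,
    bBuild terminals items st = (pvPlist items).foldl (fun st q => bBuildProd terminals q.1 st q.2) st := by
  intro items
  induction items with
  | nil => intro st; rfl
  | cons e rest ih =>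
    intro st
    show bBuild terminals rest (e.2.foldl (bBuildProd terminals e.1) st) = _
    rw [ih]
    simp [pvPlist, List.foldl_append, List.foldl_map]

-- what the build loop has established after processing the pair list pl
def pvBuildInv (terminals : List String) (pl : List (String × List String))
    (st : PySem.Dict String (List Nat) × List Int × List String × List String × PySem.Set String) : Prop :=
  st.2.2.1 = pl.map Prod.fst ∧
  st.2.1 = pl.map (fun e => ((bUnres terminals e.2).length : Int)) ∧
  (∀ s i, ((st.1.getD s []).count i) = if h : i < pl.length then (bUnres terminals (pl[i]'h).2).count s else 0) ∧
  st.2.2.2.2 = st.2.2.2.1 ∧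
  List.Nodup st.2.2.2.2 ∧
  (∀ x, x ∈ st.2.2.2.2 ↔ ∃ i, ∃ h : i < pl.length, (pl[i]'h).1 = x ∧ bUnres terminals (pl[i]'h).2 = [])

theorem pvBuildProd_step (terminals : List String) (pl : List (String × List String)) (nt : String) (p : List String)
    (st : PySem.Dict String (List Nat) × List Int × List String × List String × PySem.Set String)
    (h : pvBuildInv terminals pl st) :
    pvBuildInv terminals (pl ++ [(nt, p)]) (bBuildProd terminals nt st p) := by
  obtain ⟨occurs, need, owner, queue, productive⟩ := st
  obtain ⟨ho, hn, hc, hq, hnd, hiff⟩ := h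
  dsimp only at ho hn hc hq hnd hiff
  have hlen : need.length = pl.length := by rw [hn]; simp
  have hocc2 : ∀ s i, ((((bUnres terminals p).map (fun s => (s, need.length))).foldl
      (fun d q => d.modify q.1 [] (fun l => l ++ [q.2])) occurs).getD s []).count i =
      (occurs.getD s []).count i + (if i = need.length then (bUnres terminals p).count s else 0) := by
    intro s i
    rw [PySem.Dict.getD_foldl_modify_append, List.count_append]
    congr 1
    rw [List.filter_map]
    have hpred : ((fun q => q.1 == s) ∘ (fun s' => (s', need.length))) = (fun s' => s' == s) := rfl
    rw [hpred, List.filter_beq, List.map_replicate, List.map_replicate, List.count_replicate]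
    by_cases hie : i = need.length
    · simp [hie]
    · rw [if_neg (by simpa using fun h => hie h.symm), if_neg hie]
  have hocc3 : ∀ s i, ((((bUnres terminals p).map (fun s => (s, need.length))).foldl
      (fun d q => d.modify q.1 [] (fun l => l ++ [q.2])) occurs).getD s []).count i =
      if h : i < (pl ++ [(nt, p)]).length then (bUnres terminals ((pl ++ [(nt, p)])[i]'h).2).count s else 0 := by
    intro s i
    rw [hocc2, hc]
    rcases lt_trichotomy i pl.length with hi | hi | hi
    · rw [dif_pos hi, dif_pos (by simp; omega), if_neg (by omega)]
      rw [List.getElem_append_left hi]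
      omega
    · subst hi
      rw [dif_neg (by omega), if_pos hlen.symm, dif_pos (by simp)]
      have : (pl ++ [(nt, p)])[pl.length]'(by simp) = (nt, p) := List.getElem_concat_length rfl (by simp)
      rw [this]
      simp
    · rw [dif_neg (by omega), if_neg (by omega), dif_neg (by simp; omega)]
  unfold bBuildProd
  dsimp only
  split
  · rename_i hg
    have hE : bUnres terminals p = [] := by
      have := ((Bool.and_eq_true _ _).mp hg).1
      simpa [List.isEmpty_iff] using this
    have hNC : PySem.Set.contains productive nt = false := by
      have := ((Bool.and_eq_true _ _).mp hg).2
      simpa using this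
    have hnm : nt ∉ productive := fun hm => by
      rw [(PySem.Set.contains_iff productive nt).mpr hm] at hNC; exact absurd hNC (by simp)
    have hadd : PySem.Set.add productive nt = productive ++ [nt] := PySem.Set.add_of_not_mem hnm
    refine ⟨by dsimp only; rw [ho]; simp, by dsimp only; rw [hn]; simp, hocc3, ?_, ?_, ?_⟩
    · dsimp only; rw [hadd, hq]
    · dsimp only; rw [hadd]
      rw [List.nodup_append]
      refine ⟨hnd, List.nodup_singleton _, ?_⟩
      intro a ha b hb
      have hbnt : b = nt := by simpa using hb
      exact fun heq => hnm ((heq.trans hbnt) ▸ ha)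
    · intro x
      dsimp only
      rw [hadd]
      constructor
      · intro hxm
        rcases List.mem_append.mp hxm with hxm | hxm
        · obtain ⟨i, hih, h1, h2⟩ := (hiff x).mp hxm
          exact ⟨i, by simp; omega, by rw [List.getElem_append_left hih]; exact h1,
            by rw [List.getElem_append_left hih]; exact h2⟩
        · have hx : x = nt := by simpa using hxm
          subst hx
          refine ⟨pl.length, by simp, ?_, ?_⟩
          · rw [List.getElem_concat_length rfl (by simp)]
          · rw [List.getElem_concat_length rfl (by simp)]; exact hE
      · rintro ⟨i, hih, h1, h2⟩
        by_cases hi : i < pl.length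
        · rw [List.getElem_append_left hi] at h1 h2
          exact List.mem_append_left _ ((hiff x).mpr ⟨i, hi, h1, h2⟩)
        · have hieq : i = pl.length := by simp at hih; omega
          subst hieq
          rw [List.getElem_concat_length rfl (by simp)] at h1
          exact List.mem_append_right _ (by simp [← h1])
  · rename_i hg
    refine ⟨by dsimp only; rw [ho]; simp, by dsimp only; rw [hn]; simp, hocc3, hq, hnd, ?_⟩
    intro x
    dsimp only
    constructor
    · intro hxm
      obtain ⟨i, hih, h1, h2⟩ := (hiff x).mp hxm
      exact ⟨i, by simp; omega, by rw [List.getElem_append_left hih]; exact h1,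
        by rw [List.getElem_append_left hih]; exact h2⟩
    · rintro ⟨i, hih, h1, h2⟩
      by_cases hi : i < pl.length
      · rw [List.getElem_append_left hi] at h1 h2
        exact (hiff x).mpr ⟨i, hi, h1, h2⟩
      · have hieq : i = pl.length := by simp at hih; omega
        subst hieq
        rw [List.getElem_concat_length rfl (by simp)] at h1 h2
        have hEe : ((bUnres terminals p).isEmpty && !(PySem.Set.contains productive nt)) = false := by
          simpa using hg
        have hE : (bUnres terminals p).isEmpty = true := by
          simp [List.isEmpty_iff]; exact h2
        rw [hE, Bool.true_and] at hEe
        have hCn : PySem.Set.contains productive nt = true := by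
          cases hcn : PySem.Set.contains productive nt
          · rw [hcn] at hEe; simp at hEe
          · rfl
        have hmem : nt ∈ productive := (PySem.Set.contains_iff productive nt).mp hCn
        exact h1 ▸ hmem

theorem pvBuild_inv_fold (terminals : List String) : ∀ (pl pl0 : List (String × List String)) st,
    pvBuildInv terminals pl0 st →
    pvBuildInv terminals (pl0 ++ pl) (pl.foldl (fun st q => bBuildProd terminals q.1 st q.2) st) := by
  intro pl
  induction pl with
  | nil => intro pl0 st h; simpa using h
  | cons q rest ih =>
    intro pl0 st h
    have := ih (pl0 ++ [q]) (bBuildProd terminals q.1 st q.2) (pvBuildProd_step terminals pl0 q.1 q.2 st h)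
    simpa using this

-- ---------- B-side: counter bookkeeping ----------
theorem pvCountP_split (P : List String) (x : String) (hx : x ∉ P) : ∀ (l : List String),
    l.countP (fun s => !(P.contains s)) =
      l.countP (fun s => !((P ++ [x]).contains s)) + l.count x := by
  intro l
  induction l with
  | nil => simp
  | cons a t ih =>
    rw [List.countP_cons, List.countP_cons, List.count_cons]
    by_cases haP : a ∈ P
    · have hax : a ≠ x := fun h => hx (h ▸ haP)
      simp [haP, hax] at ih ⊢
      omega
    · by_cases hax : a = x
      · subst hax
        simp [haP] at ih ⊢
        omega
      · simp [haP, hax] at ih ⊢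
        omega

-- ---------- B-side: the inner occurrence loop keeps the counter invariant ----------
theorem pvBInner_master (terminals : List String) (items : List (String × List (List String)))
    (pl : List (String × List String))
    (Hlink : ∀ e ∈ pl, ∃ prods, (e.1, prods) ∈ items ∧ e.2 ∈ prods)
    (P : List String) :
    ∀ (L : List Nat) (need : List Int) (S : PySem.Set String) (Q : List String),
    (∀ j ∈ L, j < pl.length) →
    need.length = pl.length →
    (∀ i (h : i < pl.length), need.getD i 0 =
      (((bUnres terminals (pl[i]'h).2).countP (fun s => !(P.contains s)) : Nat) : Int) + (L.count i : Nat)) →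
    (∀ y ∈ P, y ∈ S) →
    List.Nodup S →
    (∀ i (h : i < pl.length), need.getD i 0 = 0 → (pl[i]'h).1 ∈ S) →
    (∀ y ∈ S, Productive items terminals y) →
    (bInner (pl.map Prod.fst) L need S Q).1.length = pl.length ∧
    (∀ i (h : i < pl.length), (bInner (pl.map Prod.fst) L need S Q).1.getD i 0 =
      (((bUnres terminals (pl[i]'h).2).countP (fun s => !(P.contains s)) : Nat) : Int)) ∧
    (∃ ext, (bInner (pl.map Prod.fst) L need S Q).2.1 = S ++ ext ∧
      (bInner (pl.map Prod.fst) L need S Q).2.2 = Q ++ ext) ∧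
    (∀ y ∈ P, y ∈ (bInner (pl.map Prod.fst) L need S Q).2.1) ∧
    List.Nodup (bInner (pl.map Prod.fst) L need S Q).2.1 ∧
    (∀ i (h : i < pl.length), (bInner (pl.map Prod.fst) L need S Q).1.getD i 0 = 0 →
      (pl[i]'h).1 ∈ (bInner (pl.map Prod.fst) L need S Q).2.1) ∧
    (∀ y ∈ (bInner (pl.map Prod.fst) L need S Q).2.1, Productive items terminals y) := by
  intro L
  induction L with
  | nil =>
    intro need S Q hsub hlen hneed hPS hnd hzero hsound
    rw [bInner]
    refine ⟨hlen, ?_, ⟨[], by simp, by simp⟩, hPS, hnd, hzero, hsound⟩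
    intro i h
    simpa using hneed i h
  | cons pid rest ih =>
    intro need S Q hsub hlen hneed hPS hnd hzero hsound
    have hsubr : ∀ j ∈ rest, j < pl.length := fun j hj => hsub j (List.mem_cons_of_mem _ hj)
    have hpid : pid < pl.length := hsub pid List.mem_cons_self
    have hpidn : pid < need.length := by omega
    have hval : need.getD pid 0 =
        (((bUnres terminals ((pl[pid]'hpid)).2).countP (fun s => !(P.contains s)) : Nat) : Int)
          + ((rest.count pid : Nat) : Int) + 1 := by
      rw [hneed pid hpid]
      have hcc : (pid :: rest).count pid = rest.count pid + 1 := by simp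
      rw [hcc]; push_cast; ring
    have hlen' : (need.set pid (need.getD pid 0 - 1)).length = pl.length := by
      rw [List.length_set]; exact hlen
    have hgetset : (need.set pid (need.getD pid 0 - 1)).getD pid 0 = need.getD pid 0 - 1 := by
      rw [List.getD_eq_getElem _ _ (by simpa using hpidn), List.getElem_set_self]
    have hgetne : ∀ j, j ≠ pid → (need.set pid (need.getD pid 0 - 1)).getD j 0 = need.getD j 0 := by
      intro j hj
      unfold List.getD
      rw [List.getElem?_set_ne (by omega)]
    have hneed' : ∀ i (h : i < pl.length), (need.set pid (need.getD pid 0 - 1)).getD i 0 =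
        (((bUnres terminals ((pl[i]'h)).2).countP (fun s => !(P.contains s)) : Nat) : Int)
          + ((rest.count i : Nat) : Int) := by
      intro i h
      by_cases hip : i = pid
      · subst hip
        rw [hgetset, hval]; ring
      · rw [hgetne i hip, hneed i h]
        have : (pid :: rest).count i = rest.count i := by
          simp [List.count_cons]
          omega
        rw [this]
    rw [bInner]
    split
    · rename_i h0
      have h00 : (need.set pid (need.getD pid 0 - 1)).getD pid 0 = 0 := by simpa using h0
      have hcnt0 : ((bUnres terminals ((pl[pid]'hpid)).2).countP (fun s => !(P.contains s))) = 0 ∧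
          rest.count pid = 0 := by
        have := hneed' pid hpid
        rw [h00] at this
        constructor <;> omega
      have hnt : (pl.map Prod.fst).getD pid "" = (pl[pid]'hpid).1 := by
        rw [List.getD_eq_getElem _ _ (by simpa using hpid)]
        simp
      have hprodnt : ∀ T : PySem.Set String, (∀ y ∈ P, y ∈ T) → (∀ y ∈ T, Productive items terminals y) →
          Productive items terminals ((pl[pid]'hpid).1) := by
        intro T hPT hTs
        obtain ⟨prods, hpm, hpp⟩ := Hlink (pl[pid]'hpid) (List.getElem_mem hpid)
        refine Productive.step _ prods ((pl[pid]'hpid).2) hpm hpp ?_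
        intro sy hs hsT
        have hsu : sy ∈ bUnres terminals ((pl[pid]'hpid).2) := by
          refine List.mem_filter.mpr ⟨hs, ?_⟩
          have : terminals.contains sy = false := by
            cases hcc : terminals.contains sy
            · rfl
            · exact absurd (List.contains_iff_mem.mp hcc) hsT
          rw [this]; rfl
        have : ¬(!(P.contains sy)) = true := List.countP_eq_zero.mp hcnt0.1 sy hsu
        have hsP : sy ∈ P := by
          have : P.contains sy = true := by
            cases hcc : P.contains sy
            · rw [hcc] at this; simp at this
            · rfl
          exact List.contains_iff_mem.mp this
        exact hTs sy (hPT sy hsP)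
      split
      · rename_i hcs
        refine ih (need.set pid (need.getD pid 0 - 1)) S Q hsubr hlen' hneed' hPS hnd ?_ hsound
        intro i h hz
        by_cases hip : i = pid
        · subst hip
          rw [hnt] at hcs
          exact (PySem.Set.contains_iff S _).mp hcs
        · exact hzero i h (by rw [← hgetne i hip]; exact hz)
      · rename_i hcs
        have hnm : (pl.map Prod.fst).getD pid "" ∉ S := fun hm => hcs ((PySem.Set.contains_iff S _).mpr hm)
        have hadd : PySem.Set.add S ((pl.map Prod.fst).getD pid "") = S ++ [(pl.map Prod.fst).getD pid ""] :=
          PySem.Set.add_of_not_mem hnm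
        have hPS' : ∀ y ∈ P, y ∈ PySem.Set.add S ((pl.map Prod.fst).getD pid "") := by
          intro y hy; rw [hadd]; exact List.mem_append_left _ (hPS y hy)
        have hnd' : List.Nodup (PySem.Set.add S ((pl.map Prod.fst).getD pid "")) := by
          rw [hadd, List.nodup_append]
          refine ⟨hnd, List.nodup_singleton _, ?_⟩
          intro a ha b hb
          have hbnt : b = (pl.map Prod.fst).getD pid "" := by simpa using hb
          exact fun heq => hnm ((heq.trans hbnt) ▸ ha)
        have hzero' : ∀ i (h : i < pl.length), (need.set pid (need.getD pid 0 - 1)).getD i 0 = 0 →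
            (pl[i]'h).1 ∈ PySem.Set.add S ((pl.map Prod.fst).getD pid "") := by
          intro i h hz
          by_cases hip : i = pid
          · subst hip
            rw [hadd, hnt]
            exact List.mem_append_right _ (by simp)
          · rw [hadd]
            exact List.mem_append_left _ (hzero i h (by rw [← hgetne i hip]; exact hz))
        have hsound' : ∀ y ∈ PySem.Set.add S ((pl.map Prod.fst).getD pid ""), Productive items terminals y := by
          intro y hy
          rw [hadd] at hy
          rcases List.mem_append.mp hy with hy | hy
          · exact hsound y hy
          · have : y = (pl.map Prod.fst).getD pid "" := by simpa using hy
            subst this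
            rw [hnt]
            exact hprodnt S hPS hsound
        obtain ⟨c1, c2, ⟨ext', e1, e2⟩, c4, c5, c6, c7⟩ :=
          ih (need.set pid (need.getD pid 0 - 1)) (PySem.Set.add S ((pl.map Prod.fst).getD pid ""))
            (Q ++ [(pl.map Prod.fst).getD pid ""]) hsubr hlen' hneed' hPS' hnd' hzero' hsound'
        refine ⟨c1, c2, ⟨(pl.map Prod.fst).getD pid "" :: ext', ?_, ?_⟩, c4, c5, c6, c7⟩
        · rw [e1, hadd]; simp
        · rw [e2]; simp
    · rename_i h0
      refine ih (need.set pid (need.getD pid 0 - 1)) S Q hsubr hlen' hneed' hPS hnd ?_ hsound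
      intro i h hz
      by_cases hip : i = pid
      · subst hip
        exact absurd (by rw [hz]; rfl) h0
      · exact hzero i h (by rw [← hgetne i hip]; exact hz)

-- ---------- B-side: the worklist loop reaches the productive fixpoint ----------
theorem pvBPop_master (terminals : List String) (items : List (String × List (List String)))
    (pl : List (String × List String))
    (Hlink : ∀ e ∈ pl, ∃ prods, (e.1, prods) ∈ items ∧ e.2 ∈ prods)
    (occurs : PySem.Dict String (List Nat))
    (Hocc : ∀ s i, ((occurs.getD s []).count i) = if h : i < pl.length then (bUnres terminals (pl[i]'h).2).count s else 0) :
    ∀ (need : List Int) (S : PySem.Set String) (Q : List String), ∀ (P : List String),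
    S = P ++ Q →
    List.Nodup S →
    need.length = pl.length →
    (∀ i (h : i < pl.length), need.getD i 0 =
      (((bUnres terminals (pl[i]'h).2).countP (fun s => !(P.contains s)) : Nat) : Int)) →
    (∀ i (h : i < pl.length), need.getD i 0 = 0 → (pl[i]'h).1 ∈ S) →
    (∀ y ∈ S, Productive items terminals y) →
    (∀ y ∈ bPop (pl.map Prod.fst) occurs need S Q, Productive items terminals y) ∧
    (∀ i (h : i < pl.length),
      (bUnres terminals (pl[i]'h).2).countP (fun s => !(PySem.Set.contains (bPop (pl.map Prod.fst) occurs need S Q) s)) = 0 →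
      (pl[i]'h).1 ∈ bPop (pl.map Prod.fst) occurs need S Q) := by
  intro need S Q
  induction need, S, Q using bPop.induct (owner := pl.map Prod.fst) (occurs := occurs) with
  | case1 need S =>
    intro P hSP hnd hlen hneed hzero hsound
    rw [bPop]
    have hSeq : S = P := by simpa using hSP
    refine ⟨hsound, ?_⟩
    intro i h hcp
    refine hzero i h ?_
    rw [hneed i h]
    have : (bUnres terminals ((pl[i]'h)).2).countP (fun s => !(P.contains s)) = 0 := by
      rw [← hcp]
      congr 1
      funext sy
      rw [hSeq]
      rfl
    rw [this]
    rfl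
  | case2 need S x rest r ih =>
    intro P hSP hnd hlen hneed hzero hsound
    have hxP : x ∉ P := by
      rw [hSP] at hnd
      have := List.nodup_append.mp hnd
      exact fun hm => this.2.2 x hm x List.mem_cons_self rfl
    have hsub : ∀ j ∈ occurs.getD x [], j < pl.length := by
      intro j hj
      have hpos : 0 < (occurs.getD x []).count j := List.count_pos_iff.mpr hj
      by_contra hge
      rw [Hocc x j, dif_neg hge] at hpos
      omega
    have hneedL : ∀ i (h : i < pl.length), need.getD i 0 =
        (((bUnres terminals ((pl[i]'h)).2).countP (fun s => !((P ++ [x]).contains s)) : Nat) : Int)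
          + (((occurs.getD x []).count i : Nat) : Int) := by
      intro i h
      rw [hneed i h, Hocc x i, dif_pos h]
      rw [pvCountP_split P x hxP]
      push_cast
      ring
    have hPS : ∀ y ∈ P ++ [x], y ∈ S := by
      intro y hy
      rw [hSP]
      rcases List.mem_append.mp hy with hy | hy
      · exact List.mem_append_left _ hy
      · have : y = x := by simpa using hy
        subst this
        exact List.mem_append_right _ List.mem_cons_self
    obtain ⟨c1, c2, ⟨ext, e1, e2⟩, c4, c5, c6, c7⟩ :=
      pvBInner_master terminals items pl Hlink (P ++ [x]) (occurs.getD x []) need S rest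
        hsub hlen hneedL hPS hnd hzero hsound
    have hr : r = bInner (pl.map Prod.fst) (occurs.getD x []) need S rest := rfl
    rw [bPop]
    refine ih (P ++ [x]) ?_ ?_ ?_ ?_ ?_ ?_
    · rw [hr, e1, e2, hSP]
      simp
    · rw [hr]; exact c5
    · rw [hr]; exact c1
    · intro i h
      rw [hr]; exact c2 i h
    · intro i h hz
      rw [hr] at hz ⊢
      exact c6 i h hz
    · intro y hy
      rw [hr] at hy
      exact c7 y hy

-- ===== VERDICT (by name: the statement is the Claim_ definition above) =====
theorem find_nonproductive_nonterminals_spec : Claim_equal_find_nonproductive_nonterminals := by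
  unfold Claim_equal_find_nonproductive_nonterminals
  intro grammar terminals _
  unfold Spec_find_nonproductive_nonterminals
  have hnd : (((PySem.Dict.ofList grammar).items).map Prod.fst).Nodup := by
    have h := PySem.Dict.nodup_keys_ofList (κ := String) (ν := List (List String)) grammar
    simpa [PySem.Dict.keys] using h
  set items := (PySem.Dict.ofList grammar).items with hitems
  set pl := pvPlist items with hpl
  have Hlink : ∀ e ∈ pl, ∃ prods, (e.1, prods) ∈ items ∧ e.2 ∈ prods := by
    intro e he
    rw [hpl] at he
    simp only [pvPlist, List.mem_flatMap] at he
    obtain ⟨a, ha, hee⟩ := he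
    obtain ⟨p, hp, hep⟩ := List.mem_map.mp hee
    refine ⟨a.2, ?_, ?_⟩
    · rw [← hep]; exact ha
    · rw [← hep]; exact hp
  have hinv0 : pvBuildInv terminals [] (PySem.Dict.empty, [], [], [], PySem.Set.empty) := by
    refine ⟨rfl, rfl, ?_, rfl, List.nodup_nil, ?_⟩
    · intro s i
      rw [PySem.Dict.getD_empty]
      simp
    · intro x
      constructor
      · intro hx
        exact absurd hx (List.not_mem_nil)
      · rintro ⟨i, hlt, _⟩
        exact absurd hlt (by simp)
  have hinv : pvBuildInv terminals pl (bBuild terminals items (PySem.Dict.empty, [], [], [], PySem.Set.empty)) := by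
    rw [pvBuild_eq]
    have := pvBuild_inv_fold terminals pl [] _ hinv0
    simpa using this
  rcases hbb : bBuild terminals items (PySem.Dict.empty, [], [], [], PySem.Set.empty) with ⟨occurs, need, owner, queue, productive⟩
  rw [hbb] at hinv
  obtain ⟨ho, hn, hc, hq, hnds, hiff⟩ := hinv
  dsimp only at ho hn hc hq hnds hiff
  have hlenn : need.length = pl.length := by rw [hn]; simp
  have hpredE : (fun s : String => !(([] : List String).contains s)) = fun _ => true := rfl
  have hneedI : ∀ i (h : i < pl.length), need.getD i 0 =
      (((bUnres terminals ((pl[i]'h)).2).countP (fun s => !(([] : List String).contains s)) : Nat) : Int) := by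
    intro i h
    rw [hpredE, List.countP_true, hn,
      List.getD_eq_getElem _ _ (by simp; omega), List.getElem_map]
  have hzeroI : ∀ i (h : i < pl.length), need.getD i 0 = 0 → (pl[i]'h).1 ∈ productive := by
    intro i h hz
    rw [hneedI i h] at hz
    rw [hpredE, List.countP_true] at hz
    have hz' : (bUnres terminals ((pl[i]'h)).2).length = 0 := by exact_mod_cast hz
    exact (hiff _).mpr ⟨i, h, rfl, List.eq_nil_of_length_eq_zero hz'⟩
  have hsoundI : ∀ y ∈ productive, Productive items terminals y := by
    intro y hy
    obtain ⟨i, h, h1, h2⟩ := (hiff y).mp hy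
    obtain ⟨prods, hm, hp⟩ := Hlink (pl[i]'h) (List.getElem_mem h)
    refine Productive.step y prods ((pl[i]'h).2) (h1 ▸ hm) hp ?_
    intro sy hs hsT
    exfalso
    have hsu : sy ∈ bUnres terminals ((pl[i]'h).2) := by
      refine List.mem_filter.mpr ⟨hs, ?_⟩
      have : terminals.contains sy = false := by
        cases hcc : terminals.contains sy
        · rfl
        · exact absurd (List.contains_iff_mem.mp hcc) hsT
      rw [this]; rfl
    rw [h2] at hsu
    exact List.not_mem_nil hsu
  obtain ⟨hRsound, hRclosed⟩ :=
    pvBPop_master terminals items pl Hlink occurs hc need productive queue []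
      (by simpa using hq) hnds hlenn hneedI hzeroI hsoundI
  have hRcomp : ∀ y, Productive items terminals y →
      y ∈ bPop (pl.map Prod.fst) occurs need productive queue := by
    intro y hy
    induction hy with
    | step nt prods p hmem hp hsym ih =>
      have hplmem : (nt, p) ∈ pl := by
        rw [hpl]
        simp only [pvPlist, List.mem_flatMap]
        exact ⟨(nt, prods), hmem, List.mem_map.mpr ⟨p, hp, rfl⟩⟩
      obtain ⟨i, hlt, hi⟩ := List.getElem_of_mem hplmem
      have hcnt : (bUnres terminals ((pl[i]'hlt)).2).countP
          (fun s => !(PySem.Set.contains (bPop (pl.map Prod.fst) occurs need productive queue) s)) = 0 := by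
        rw [hi]
        refine List.countP_eq_zero.mpr ?_
        intro sy hsy
        have hsp : sy ∈ p := (List.mem_filter.mp hsy).1
        have hsnt : sy ∉ terminals := by
          have := (List.mem_filter.mp hsy).2
          intro hm
          rw [List.contains_iff_mem.mpr hm] at this
          exact absurd this (by simp)
        have := ih sy hsp hsnt
        rw [(PySem.Set.contains_iff _ sy).mpr this]
        simp
      have := hRclosed i hlt hcnt
      rw [hi] at this
      exact this
  have hAiff : ∀ k, PySem.Set.contains (pyLoop terminals items PySem.Set.empty) k =
      PySem.Set.contains (bPop (pl.map Prod.fst) occurs need productive queue) k := by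
    intro k
    have hEmptyInv : ∀ x, PySem.Set.contains PySem.Set.empty x = true → Productive items terminals x := by
      intro y hy
      simp [PySem.Set.contains, PySem.Set.empty] at hy
    cases hA : PySem.Set.contains (pyLoop terminals items PySem.Set.empty) k
    · cases hB : PySem.Set.contains (bPop (pl.map Prod.fst) occurs need productive queue) k
      · rfl
      · have hk : k ∈ bPop (pl.map Prod.fst) occurs need productive queue :=
          (PySem.Set.contains_iff _ k).mp hB
        have := pvA_complete terminals items k (hRsound k hk)
        rw [this] at hA
        exact absurd hA (by simp)
    · have hprod := pvPyLoop_sound items terminals PySem.Set.empty hEmptyInv k hA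
      exact ((PySem.Set.contains_iff _ k).mpr (hRcomp k hprod)).symm
  have halt : find_nonproductive_nonterminals_alt grammar terminals =
      PySem.Set.ofList ((items.map Prod.fst).filter
        (fun k => !(PySem.Set.contains (bPop owner occurs need productive queue) k))) := by
    simp only [find_nonproductive_nonterminals_alt]
    rw [← hitems, hbb]
    rfl
  show PySem.Set.diff (PySem.Set.ofList (PySem.Dict.keys (PySem.Dict.ofList grammar)))
      (pyLoop terminals items PySem.Set.empty) = find_nonproductive_nonterminals_alt grammar terminals
  rw [halt]
  have hkeys : PySem.Dict.keys (PySem.Dict.ofList grammar) = items.map Prod.fst := rfl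
  rw [hkeys, PySem.Set.ofList_eq_self_of_nodup _ hnd,
    PySem.Set.ofList_eq_self_of_nodup _ (List.Nodup.filter _ hnd)]
  show (items.map Prod.fst).filter (fun x => !(PySem.Set.contains (pyLoop terminals items PySem.Set.empty) x)) =
    (items.map Prod.fst).filter (fun k => !(PySem.Set.contains (bPop owner occurs need productive queue) k))
  rw [ho]
  refine List.filter_congr ?_
  intro k _
  rw [hAiff k]
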